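/- GENERATED by tools/from_farm_form.py from prooffarm-gif/accepted/DGifDecompressLine.15/Lemmas.lean (a worked proof of the farm's unit `DGifDecompressLine.15`,
   accepted by the verdict) — do not edit. -/
import Gif.Spec.Units.DGifDecompressLine_15
import Gif.Spec.AllSegs

/-!
  Lemmas for the unit `DGifDecompressLine.15` (segment 15 of the LZW decoder, l.990-992 and l.995): the segment is walked in TWO
  STEPS that meet at the return address of the call of `DGifGetPrefixChar` (107051H, `ret37`). The assertion there is the entry
  assertion `UpdRC` again, at the label `ret37` (its `cut` is a parameter): the callee writes nothing but stack below the body's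
  stack pointer (a `Scratch` window of Gif/Spec/LzwCarry.lean), and `r15d` = RunningCode is callee-saved.

      dl15_seg_call     107045H … the call of DGifGetPrefixChar … 107051H:  `UpdRC at_107045` → `UpdRC ret37`
      dl15_seg_tail     107051H … the checked store `Suffix[RunningCode − 2] =` … 106F75H … 106F7DH:  `UpdRC ret37` → `Head`
-/

open X86 X86.User Asan ProgX.Base ProgX.Base.Spec Gif.Spec

set_option maxRecDepth 4000
set_option maxHeartbeats 4000000

namespace Gif.Spec.DGifDecompressLine_15

/-- **107045H … the call of DGifGetPrefixChar … 107051H (ret37)** (dgif_lib.c:991 `DGifGetPrefixChar(Prefix, CrntCode, ClearCode)`):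
`edx = ClearCode` from its slot (`≤ 256` by [LZ2]: not negative), `rdi = r13 = Prefix`, `esi` as it is. The callee stores
nothing but its own stack: `UpdRC` again at the return address. -/
theorem dl15_seg_call (Lay : Layout) (hLay : Lay.hi = 0x1000000) (μ : Microarch) (hμ : UserX.MicroOK μ) (u₀ : State)
    (hcode : HasCodeNat Lay u₀ Gif.L.DGifDecompressLine.entry Gif.Code.code_DGifDecompressLine.nat
      Gif.L.DGifDecompressLine.size)
    (H : Heap) (rest : List Obj) (frames : List (Nat × FrameLayout)) (F : Forest) (R : Rd) (n m : Nat) (e : State) (ret : Word)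
    (h_gpc : Calls Lay μ ProgX.Base.WayInv (ProgX.Base.conv u₀) Gif.L.DGifGetPrefixChar.entry
      (Gif.Spec.DGifGetPrefixChar.spec H rest (DGifDecompressLine.framesIn frames e) F.pv))
    (v : State) (hat : DGifDecompressLine.UpdRC Gif.L.DGifDecompressLine.at_107045 m H rest frames F R n u₀ e ret v) :
    ReachVia Lay μ ProgX.Base.WayInv v
      (DGifDecompressLine.UpdRC Gif.L.DGifDecompressLine.ret37 m H rest frames F R n u₀ e ret) := by
  obtain ⟨⟨⟨hbody, hloc, h_r14, h_r13, h_rbx, h_rbp, h_w1⟩, h_mu⟩, h_rclo, h_rchi⟩ := hat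
  -- 1. THE PRELUDE (Gif/Spec/LzwCarry.lean §2)
  have he := hbody.entry
  v_entry he
  have hgin := hbody.gif_inside
  have hpin := hbody.pv_inside
  have hn31 : n < 2 ^ 31 := hbody.len_lt
  have henv : Env H rest frames F R e := hbody.pre.1
  have w_rip := hbody.rip
  have c_rsp : v.reg .rsp = e.reg .rsp - 200 := hbody.rsp
  have w_eq : Mem.EqOn ProgX.Base.L.textLo ProgX.Base.L.textHi u₀.mem v.mem := ProgX.Base.conv_code_eqOn hbody.code
  have hdf : v.flags .df = false := (show abiInv _ from hbody.abi).1
  have hmx : v.mxcsr &&& 0x1F80 = 0x1F80 := (show abiInv _ from hbody.abi).2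
  have hsse := ProgX.Base.sseOK_of_abiInv hbody.abi
  have w_kept : RegsKept [.rsp] v v := RegsKept.refl _ _
  -- 2. THE SLOT THE SEGMENT READS: ClearCode, `[rsp+10H]`, a number `≤ 256`
  have hclear := hbody.lz.clear
  obtain ⟨cc, k_cc⟩ : ∃ cc, GifFilePrivateType.ClearCode v.mem F.pv = cc := ⟨_, rfl⟩
  rw [k_cc] at hclear
  have k_clear : v.mem.readLE (e.reg .rsp - 184) 4 = cc := by
    rw [← k_cc]
    exact hloc.s_clear
  -- 3. THE WALK, to the call's return address
  u_walk hcode [hμ.vendor] until [Gif.L.DGifDecompressLine.ret37]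
    span [ProgX.Base.L.textLo, ProgX.Base.L.textHi] side (v_side)
  case call_inv =>
    v_inv
  case pre_10704c =>
    -- DGifGetPrefixChar'S PRECONDITION. The environment for the frame list with the own frame in front: only the return address
    -- was pushed since `v`
    have hs : Mem.SameExcept [⟨(e.reg .rsp).toNat - 560, (e.reg .rsp).toNat - 200⟩] v.mem s_10704c.mem := by
      rw [w_mem]
      u_same
    have henv' : Env H rest (DGifDecompressLine.framesIn frames e) F R s_10704c := by
      refine henv.at_call hbody.inv hbody.ok hs (by omega) (by omega) ?_ ?_ ?_
      · rw [w_rsp]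
        u_omega
      · rw [w_rsp]
        u_omega
      · rw [w_rsp]
        u_omega
    -- the four clauses: `HeapPre`, pv live, `rdi = Prefix`, `edx = ClearCode` not negative
    refine ⟨henv'.heap, hbody.ok.pv_live, ?_, ?_⟩
    · rw [w_rdi]
      exact h_r13
    · rw [w_rdx, Gif.Spec.toNat_ofBV_ofNat32 cc (by omega)]
      omega
  -- 0x107051 (ret37): DGifGetPrefixChar HAS RETURNED. Its post: no shadow byte written
  have hpost : ShadowUntouched s_10704c.mem s_10704cr.mem := w_post
  -- the callee's footprint in terms of `v`
  v_after_call w_rsp_10704c w_mem_10704c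
  -- what was stored since `v`: the return address, the callee's frame: stack below the body's stack pointer
  have hsame : Mem.SameExcept [⟨(e.reg .rsp).toNat - 560, (e.reg .rsp).toNat - 200⟩] v.mem s_10704cr.mem := by u_same
  have hun : ShadowUntouched v.mem s_10704cr.mem := by v_untouched
  -- `Body`, `Locals`, the measure through it (Gif/Spec/LzwCarry.lean §3)
  obtain ⟨k_body, k_loc, k_mu, k_clear', k_eof⟩ :=
    hbody.carry (cut' := Gif.L.DGifDecompressLine.ret37) w_rip w_rsp w_eq w_inv hun hsame (by dl_scratch)
  -- `UpdRC` at ret37: the callee-saved registers are what they were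
  refine ReachVia.done ⟨⟨⟨k_body, k_loc hloc, ?_, ?_, ?_, ?_, ?_⟩, ?_⟩, ?_, ?_⟩
  · rw [w_kept .r14 rfl]
    exact h_r14
  · rw [w_kept .r13 rfl]
    exact h_r13
  · rw [w_kept .rbx rfl]
    exact h_rbx
  · rw [w_kept .rbp rfl]
    exact h_rbp
  · rw [w_kept .rbp rfl, w_kept .rbx rfl]
    exact h_w1
  · rw [k_mu]
    exact h_mu
  · rw [w_kept .r15 rfl]
    exact h_rclo
  · rw [w_kept .r15 rfl]
    exact h_rchi

/-- **107051H (ret37) … 107064H the check … 107069H the store `Suffix[RunningCode − 2] =` … 106F75H, 106F79H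
`LastCode = CrntCode` … 106F7DH** (dgif_lib.c:990 and l.995): `r12d` = the callee's result (any value; its low byte is stored),
`r15` = `Suffix + RunningCode − 2` with `2 ≤ RunningCode ≤ 4097`: an element of `Suffix[4096]`; then the frame's `CrntCode`
(`[rsp+70H]`, any value) into the slot of LastCode (`[rsp+14H]`): all `Scratch` windows, the measure is what it was. -/
theorem dl15_seg_tail (Lay : Layout) (hLay : Lay.hi = 0x1000000) (μ : Microarch) (hμ : UserX.MicroOK μ) (u₀ : State)
    (hcode : HasCodeNat Lay u₀ Gif.L.DGifDecompressLine.entry Gif.Code.code_DGifDecompressLine.nat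
      Gif.L.DGifDecompressLine.size)
    (H : Heap) (rest : List Obj) (frames : List (Nat × FrameLayout)) (F : Forest) (R : Rd) (n m : Nat) (e : State) (ret : Word)
    (h_store1 : Asan.SmallCheck Lay μ ProgX.Base.WayInv (ProgX.Base.CodeOK u₀) [.rax, .rdx] 1
      ProgX.Base.L.__asan_store1_noabort.entry)
    (v : State) (hat : DGifDecompressLine.UpdRC Gif.L.DGifDecompressLine.ret37 m H rest frames F R n u₀ e ret v) :
    ReachVia Lay μ ProgX.Base.WayInv v
      (fun w => ∃ m', m' < m ∧ DGifDecompressLine.Head m' H rest frames F R n u₀ e ret w) := by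
  obtain ⟨⟨⟨hbody, hloc, h_r14, h_r13, h_rbx, h_rbp, h_w1⟩, h_mu⟩, h_rclo, h_rchi⟩ := hat
  -- 1. THE PRELUDE (Gif/Spec/LzwCarry.lean §2)
  have he := hbody.entry
  v_entry he
  have hgin := hbody.gif_inside
  have hpin := hbody.pv_inside
  have hn31 : n < 2 ^ 31 := hbody.len_lt
  have w_rip := hbody.rip
  have c_rsp : v.reg .rsp = e.reg .rsp - 200 := hbody.rsp
  have w_eq : Mem.EqOn ProgX.Base.L.textLo ProgX.Base.L.textHi u₀.mem v.mem := ProgX.Base.conv_code_eqOn hbody.code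
  have hdf : v.flags .df = false := (show abiInv _ from hbody.abi).1
  have hmx : v.mxcsr &&& 0x1F80 = 0x1F80 := (show abiInv _ from hbody.abi).2
  have hsse := ProgX.Base.sseOK_of_abiInv hbody.abi
  have w_kept : RegsKept [.rsp] v v := RegsKept.refl _ _
  -- 2. THE REGISTERS AND SLOTS THE SEGMENT READS
  -- `r15d` = RunningCode ≤ 4097: `movsxd rax, r15d` is the register itself (a fact for the walker)
  have h15_31 : (v.reg .r15).toNat < 2 ^ 31 := by omega
  -- `[rsp+18H]` = Suffix
  have k_suffix : v.mem.readLE (e.reg .rsp - 176) 8 = F.pv + 4439 := hloc.s_suffix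
  -- `[rsp+70H]` = the frame's object CrntCode, as a number
  obtain ⟨c, k_c⟩ : ∃ c, v.mem.readLE (e.reg .rsp - 88) 4 = c := ⟨_, rfl⟩
  -- 3. THE WALK, to the head of the main loop
  u_walk hcode [hμ.vendor, Gif.Spec.sext32_small (v.reg .r15) h15_31]
    until [Gif.L.DGifDecompressLine.at_106f7d]
    span [ProgX.Base.L.textLo, ProgX.Base.L.textHi] side (v_side)
  -- 4. THE CHECK GOAL: the table is live (`suffixLive`: the index against THE ARRAY'S OWN count)
  case check_107064 =>
    -- l.990 `Suffix[RunningCode − 2] =`: inside `Suffix[4096]` (`2 ≤ RunningCode ≤ 4097`)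
    have hun : ShadowUntouched v.mem s_107064.mem := by v_untouched
    have hl := suffixLive hbody.ok.pv_live rest (DGifDecompressLine.framesIn frames e) ((v.reg .r15).toNat - 2) (by omega)
    simp only [gfield] at hl
    exact hl.accSmall hbody.inv.shadow hun _ 1 (by decide) (by u_omega) (by u_omega)
  -- 5. THE EXIT 0x106f7d (l.888): the head of the main loop: `Body` through the segment's stores by `Body.carry`
  -- what was stored: the return address of the check, `Suffix[RunningCode − 2]`, the slot of LastCode
  have hun : ShadowUntouched v.mem s_106f79.mem := by v_untouched
  have hsame : Mem.SameExcept [⟨(e.reg .rsp).toNat - 208, (e.reg .rsp).toNat - 200⟩,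
      ⟨(e.reg .rsp).toNat - 180, (e.reg .rsp).toNat - 176⟩, ⟨F.pv + 4439, F.pv + 8535⟩] v.mem s_106f79.mem := by
    rw [w_mem]
    u_same
  have habi : (conv u₀).inv s_106f79 := by v_inv
  obtain ⟨k_body, k_loc, k_mu, k_clear, k_eof⟩ :=
    hbody.carry (cut' := Gif.L.DGifDecompressLine.at_106f7d) w_rip w_rsp w_eq habi hun hsame (by dl_scratch)
  -- `Head` with the measure of the exit state, which is the one of `v`, below `m`
  refine ReachVia.done ⟨mu R s_106f79.mem F.pv, ?_, ⟨k_body, k_loc hloc, ?_, ?_, ?_, ?_, ?_⟩, rfl⟩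
  · rw [k_mu]
    exact h_mu
  · rw [w_kept .r14 rfl]
    exact h_r14
  · rw [w_kept .r13 rfl]
    exact h_r13
  · rw [w_kept .rbx rfl]
    exact h_rbx
  · rw [w_kept .rbp rfl]
    exact h_rbp
  · rw [w_kept .rbp rfl, w_kept .rbx rfl]
    exact h_w1

end Gif.Spec.DGifDecompressLine_15
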